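-- pv_equiv track=rewrite | github.com/nofearOnline/riddles-solutions | codility/flags_prod.py | possible_flags
-- ===== SOURCE A (Python) =====
-- def possible_flags(peaks: [int], flags_num: int):
--     len_peaks = len(peaks)
--     peak_index = 1
--     current_min_peak = peaks[0]
--
--     for flag in range(1, flags_num):
--         current_min_peak += flags_num
--
--         while peak_index < len_peaks and current_min_peak > peaks[peak_index]:
--             peak_index += 1
--         if peak_index == len_peaks:
--             return False
--         else:
--             current_min_peak = peaks[peak_index]
--
--     return True
-- ===== SOURCE B (Python) =====
-- def possible_flags(peaks, flags_num):
--     count = 1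
--     last = peaks[0]
--     for p in peaks[1:]:
--         if p - last >= flags_num:
--             count += 1
--             last = p
--     return count >= flags_num
-- ===== Notes on version B (the rewrite author's own statement) =====
-- stated objective: simpler
-- what changed: Replaced A's flag-driven outer loop (range over flags_num with an inner index-advancing skip-while and early returns) by a single pass over the peaks list that counts greedy placements and compares the count to flags_num at the end.
-- outside the precondition, e.g. on possible_flags([], 3): A raises IndexError, B raises IndexError
import Mathlib
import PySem

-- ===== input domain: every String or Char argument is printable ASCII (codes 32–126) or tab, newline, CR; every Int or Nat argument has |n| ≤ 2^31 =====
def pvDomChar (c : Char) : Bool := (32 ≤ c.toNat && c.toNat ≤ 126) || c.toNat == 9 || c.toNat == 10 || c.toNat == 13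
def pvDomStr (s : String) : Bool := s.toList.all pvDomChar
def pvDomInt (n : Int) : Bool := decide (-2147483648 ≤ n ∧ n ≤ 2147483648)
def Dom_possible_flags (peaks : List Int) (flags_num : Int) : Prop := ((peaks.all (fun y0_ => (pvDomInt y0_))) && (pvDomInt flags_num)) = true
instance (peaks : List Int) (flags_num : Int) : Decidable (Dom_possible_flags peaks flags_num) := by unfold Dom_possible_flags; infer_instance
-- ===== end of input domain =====

-- B replaces A's flag-driven outer loop with inner skip-while by a single pass over the
-- peaks that counts greedy placements (objective: simpler; same O(n) cost).

-- ===== PORT A =====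
-- while peak_index < len_peaks and current_min_peak > peaks[peak_index]: peak_index += 1
def pfSkip (peaks : List Int) (len_peaks cmp : Int) (i : Int) : Int :=
  if _h : i < len_peaks ∧ cmp > PySem.List.pyGetD peaks i 0 then
    pfSkip peaks len_peaks cmp (i + 1)
  else i
termination_by (len_peaks - i).toNat
decreasing_by omega

-- for flag in range(1, flags_num): … (fuel = number of remaining iterations)
def pfLoop (peaks : List Int) (len_peaks flags_num : Int) :
    Nat → Int → Int → Bool
  | 0, _, _ => true
  | n + 1, peak_index, current_min_peak =>
    let cmp := current_min_peak + flags_num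
    let j := pfSkip peaks len_peaks cmp peak_index
    if j == len_peaks then false
    else pfLoop peaks len_peaks flags_num n j (PySem.List.pyGetD peaks j 0)

def possible_flags (peaks : List Int) (flags_num : Int) : Bool :=
  match PySem.List.pyGet? peaks 0 with
  | none => false  -- peaks[0] raises IndexError on []; excluded by Pre_
  | some p0 => pfLoop peaks peaks.length flags_num (flags_num - 1).toNat 1 p0

-- ===== PORT B =====
def possible_flags_alt (peaks : List Int) (flags_num : Int) : Bool :=
  match peaks with
  | [] => false  -- peaks[0] raises IndexError on []; excluded by Pre_
  | p0 :: rest =>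
    let s := rest.foldl
      (fun (s : Int × Int) p => if p - s.2 ≥ flags_num then (s.1 + 1, p) else s)
      (1, p0)
    decide (flags_num ≤ s.1)

-- ===== PRECONDITION & SPEC =====
-- Pre_ excludes only the empty list, on which both Pythons raise IndexError at peaks[0].
def Pre_possible_flags (peaks : List Int) (flags_num : Int) : Prop := peaks ≠ []
instance (peaks : List Int) (flags_num : Int) : Decidable (Pre_possible_flags peaks flags_num) := by
  unfold Pre_possible_flags; infer_instance
def pvWitness_possible_flags : List Int × Int := ([1, 5, 7], 2)

def Spec_possible_flags (peaks : List Int) (flags_num : Int) (out : Bool) : Prop := out = possible_flags_alt peaks flags_num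
instance (peaks : List Int) (flags_num : Int) (out : Bool) : Decidable (Spec_possible_flags peaks flags_num out) := by unfold Spec_possible_flags; infer_instance

-- ===== CLAIM (what is proved, stated in full; the proofs are below) =====
def Claim_equal_possible_flags : Prop := ∀ (peaks : List Int) (flags_num : Int), Dom_possible_flags peaks flags_num → Pre_possible_flags peaks flags_num → Spec_possible_flags peaks flags_num (possible_flags peaks flags_num)

-- ===== LEMMAS AND PROOFS =====

-- greedy placement count over the remaining peaks, after a flag on `last`
def gcount (flags_num last : Int) : List Int → Int
  | [] => 0
  | p :: ps => if p - last ≥ flags_num then 1 + gcount flags_num p ps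
               else gcount flags_num last ps

theorem gcount_nonneg (flags_num last : Int) (ps : List Int) :
    0 ≤ gcount flags_num last ps := by
  induction ps generalizing last with
  | nil => simp [gcount]
  | cons p ps ih =>
    simp only [gcount]
    split_ifs
    · have := ih p; omega
    · exact ih last

theorem fold_fst (flags_num : Int) (ps : List Int) :
    ∀ (c last : Int),
      (ps.foldl (fun (s : Int × Int) p =>
          if p - s.2 ≥ flags_num then (s.1 + 1, p) else s) (c, last)).1
        = c + gcount flags_num last ps := by
  induction ps with
  | nil => intro c last; simp [gcount]
  | cons p ps ih =>
    intro c last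
    simp only [List.foldl, gcount]
    split_ifs with h
    · rw [ih]; ring
    · rw [ih]

theorem pfSkip_spec (peaks : List Int) (cmp : Int) :
    ∀ (rest : List Int) (i : Int), 0 ≤ i → i ≤ (peaks.length : Int) →
      peaks.drop i.toNat = rest →
      0 ≤ pfSkip peaks peaks.length cmp i ∧
      pfSkip peaks peaks.length cmp i ≤ (peaks.length : Int) ∧
      peaks.drop (pfSkip peaks peaks.length cmp i).toNat
        = rest.dropWhile (fun p => decide (cmp > p)) := by
  intro rest
  induction rest with
  | nil =>
    intro i h0 hle hdrop
    have hi : i = (peaks.length : Int) := by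
      have := List.drop_eq_nil_iff.mp hdrop
      omega
    rw [pfSkip]
    simp [hi]
  | cons p ps ih =>
    intro i h0 hle hdrop
    have h1 : peaks[i.toNat]? = some p := by
      have h2 := congrArg (fun l => l[0]?) hdrop
      simpa [List.getElem?_drop] using h2
    obtain ⟨hlen, hval⟩ := List.getElem?_eq_some_iff.mp h1
    have hlt : i < (peaks.length : Int) := by omega
    have hget : PySem.List.pyGetD peaks i 0 = p := by
      rw [PySem.List.pyGetD_eq_getElem peaks 0 h0 hlt, hval]
    have hdrop' : peaks.drop (i + 1).toNat = ps := by
      have he : (i + 1).toNat = i.toNat + 1 := by omega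
      rw [he, ← List.tail_drop, hdrop]
      rfl
    rw [pfSkip]
    by_cases hc : cmp > p
    · have : i < (peaks.length : Int) ∧ cmp > PySem.List.pyGetD peaks i 0 :=
        ⟨hlt, by rw [hget]; exact hc⟩
      rw [dif_pos this]
      have := ih (i + 1) (by omega) (by omega) hdrop'
      simpa [List.dropWhile_cons, hc] using this
    · have : ¬ (i < (peaks.length : Int) ∧ cmp > PySem.List.pyGetD peaks i 0) := by
        rw [hget]; intro h; exact hc h.2
      rw [dif_neg this]
      refine ⟨h0, hle, ?_⟩
      simpa [List.dropWhile_cons, hc] using hdrop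

theorem gcount_dropWhile (flags_num last : Int) (rest : List Int) :
    gcount flags_num last rest
      = match rest.dropWhile (fun p => decide (last + flags_num > p)) with
        | [] => 0
        | p :: rs => 1 + gcount flags_num p rs := by
  induction rest with
  | nil => simp [gcount, List.dropWhile]
  | cons p ps ih =>
    by_cases hc : last + flags_num > p
    · have hnot : ¬ (p - last ≥ flags_num) := by omega
      simp only [gcount, if_neg hnot, List.dropWhile_cons, hc, decide_true, if_true]
      exact ih
    · have hyes : p - last ≥ flags_num := by omega
      simp only [gcount, if_pos hyes, List.dropWhile_cons, hc, decide_false,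
        Bool.false_eq_true, if_false]

theorem pfLoop_eq_gcount (peaks : List Int) (flags_num : Int)
    (hf : 1 ≤ flags_num) :
    ∀ (n : Nat) (i last : Int) (rest : List Int),
      0 ≤ i → i ≤ (peaks.length : Int) → peaks.drop i.toNat = rest →
      pfLoop peaks peaks.length flags_num n i last
        = decide ((n : Int) ≤ gcount flags_num last rest) := by
  intro n
  induction n with
  | zero =>
    intro i last rest _ _ _
    simp [pfLoop, gcount_nonneg]
  | succ n ih =>
    intro i last rest h0 hle hdrop
    simp only [pfLoop]
    obtain ⟨hj0, hjle, hjdrop⟩ :=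
      pfSkip_spec peaks (last + flags_num) rest i h0 hle hdrop
    set j := pfSkip peaks peaks.length (last + flags_num) i with hj
    rw [gcount_dropWhile flags_num last rest]
    cases hdw : rest.dropWhile (fun p => decide (last + flags_num > p)) with
    | nil =>
      have hjlen : j = (peaks.length : Int) := by
        rw [hdw] at hjdrop
        have := List.drop_eq_nil_iff.mp hjdrop
        omega
      simp only [hjlen, beq_self_eq_true, if_true]
      exact (decide_eq_false (by push_cast; omega)).symm
    | cons p rs =>
      rw [hdw] at hjdrop
      have h1 : peaks[j.toNat]? = some p := by
        have h2 := congrArg (fun l => l[0]?) hjdrop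
        simpa [List.getElem?_drop] using h2
      obtain ⟨hjlen, hjval⟩ := List.getElem?_eq_some_iff.mp h1
      have hjlt : j < (peaks.length : Int) := by omega
      have hne : (j == (peaks.length : Int)) = false := by
        simp; omega
      rw [hne]
      simp only [Bool.false_eq_true, if_false]
      have hgetj : PySem.List.pyGetD peaks j 0 = p := by
        rw [PySem.List.pyGetD_eq_getElem peaks 0 hj0 hjlt, hjval]
      rw [hgetj]
      rw [ih j p (p :: rs) hj0 hjle hjdrop]
      have hself : gcount flags_num p (p :: rs) = gcount flags_num p rs := by
        simp only [gcount]
        rw [if_neg (by omega)]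
      rw [hself]
      have hiff : ((n : Int) ≤ gcount flags_num p rs) ↔
          (((n + 1 : Nat) : Int) ≤ 1 + gcount flags_num p rs) := by
        push_cast; omega
      exact decide_eq_decide.mpr hiff

-- ===== VERDICT (by name: the statement is the Claim_ definition above) =====
theorem possible_flags_spec : Claim_equal_possible_flags := by
  intro peaks flags_num _hdom hpre
  unfold Spec_possible_flags
  match peaks with
  | [] => exact absurd rfl hpre
  | p0 :: rest =>
    simp only [possible_flags, possible_flags_alt, PySem.List.pyGet?_zero_cons]
    rw [fold_fst]
    by_cases hf : 1 ≤ flags_num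
    · rw [pfLoop_eq_gcount (p0 :: rest) flags_num hf (flags_num - 1).toNat 1 p0
        rest (by omega) (by simp only [List.length_cons]; push_cast; omega) (by simp)]
      have hn : ((flags_num - 1).toNat : Int) = flags_num - 1 := by omega
      rw [hn]
      have hiff : (flags_num - 1 ≤ gcount flags_num p0 rest) ↔
          (flags_num ≤ 1 + gcount flags_num p0 rest) := by omega
      exact decide_eq_decide.mpr hiff
    · have hn : (flags_num - 1).toNat = 0 := by omega
      rw [hn]
      simp only [pfLoop]
      have := gcount_nonneg flags_num p0 rest
      rw [decide_eq_true (by omega)]
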